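-- pv_equiv track=rewrite | github.com/VishwajeetEkal/CSCI-B505-Applied-Algorithms | Assignment 1/Solution.py | longestBlues
-- ===== SOURCE A (Python) =====
-- def longestBlues(tiles: list[int], k) -> int:
--   max = 0
--   count = 0
--   number_of_tiles = 0
--   for i in tiles:
--     if i == "blue":
--       count +=1
--     else:
--       if max < count:
--         max = count
--       count = 0
--   i = 0
--   j,window = len (tiles),len (tiles)
--   while i != j:
--     if tiles[i:j].count("pink")== k:
--       return j-i
--     i+=1
--     j+=1
--     if j > len(tiles):
--       i = 0
--       window-=1
--       j = window
-- ===== SOURCE B (Python) =====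
-- def longestBlues(tiles, k):
--     # O(n): positions of the pink tiles; a window with exactly k pinks extends
--     # maximally between the surrounding pinks (sentinels -1 and n).
--     n = len(tiles)
--     pinks = [i for i, t in enumerate(tiles) if t == "pink"]
--     m = len(pinks)
--     if k < 0 or k > m:
--         return None
--     q = [-1] + pinks + [n]
--     best = max(q[i + k + 1] - q[i] - 1 for i in range(m - k + 1))
--     return best if best > 0 else None
-- ===== Notes on version B (the rewrite author's own statement) =====
-- stated objective: faster
-- what changed: A scans every window of every width (largest first) and recounts pinks per window; B computes the pink positions once and, with sentinels -1 and n, takes the maximum span q[i+k+1]-q[i]-1 over consecutive groups of k pinks, returning it when positive.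
import Mathlib
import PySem

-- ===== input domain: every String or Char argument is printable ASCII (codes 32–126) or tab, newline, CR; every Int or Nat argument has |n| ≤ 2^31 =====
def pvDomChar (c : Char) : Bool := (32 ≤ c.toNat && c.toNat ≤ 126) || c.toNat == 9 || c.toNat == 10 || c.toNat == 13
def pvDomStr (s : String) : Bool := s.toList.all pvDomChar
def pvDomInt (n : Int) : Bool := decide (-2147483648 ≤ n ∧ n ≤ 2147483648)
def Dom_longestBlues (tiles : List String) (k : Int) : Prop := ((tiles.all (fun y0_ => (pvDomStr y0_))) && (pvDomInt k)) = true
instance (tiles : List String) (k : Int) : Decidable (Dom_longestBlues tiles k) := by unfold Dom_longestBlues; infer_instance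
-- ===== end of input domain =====

-- B replaces A's decreasing-window O(n^3) scan by an O(n) pass over the positions of the
-- "pink" tiles (each window with exactly k pinks extends maximally between two pinks).

-- ===== PORT A =====
-- first loop of A: running count of "blue" runs; its result is never used (dead code in the Python too)
def pvBlueLoop (tiles : List String) : Int × Int :=
  tiles.foldl (fun mc i =>
    if i == "blue" then (mc.1, mc.2 + 1)
    else if mc.1 < mc.2 then (mc.2, 0) else (mc.1, 0)) (0, 0)

-- A's while loop: state (i, j, window); `tiles[i:j].count("pink") == k` checked each turn.
-- `fuel` only bounds the number of iterations to make the recursion structural; longestBlues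
-- passes enough fuel for the loop to run to completion (proved in pvLoopA_eq below).
def pvLoopA (tiles : List String) (k : Int) : Nat → Nat → Nat → Nat → Option Int
  | 0, _, _, _ => none
  | (fuel + 1), i, j, window =>
    if i ≠ j then
      if ((PySem.List.count (PySem.List.slice tiles (some (i : Int)) (some (j : Int))) "pink" : Int) == k) then
        some ((j : Int) - (i : Int))
      else if tiles.length < j + 1 then pvLoopA tiles k fuel 0 (window - 1) (window - 1)
      else pvLoopA tiles k fuel (i + 1) (j + 1) window
    else none

def longestBlues (tiles : List String) (k : Int) : Option Int :=
  let _mc := pvBlueLoop tiles   -- computed and discarded, as in A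
  pvLoopA tiles k (tiles.length * (tiles.length + 1) + tiles.length) 0 tiles.length tiles.length

-- ===== PORT B =====
def longestBlues_alt (tiles : List String) (k : Int) : Option Int :=
  let n : Int := tiles.length
  -- [i for i, t in enumerate(tiles) if t == "pink"]
  let pinks : List Int := ((PySem.List.enumerate tiles).filter (fun it => it.2 == "pink")).map (fun it => it.1)
  let m : Int := pinks.length
  if k < 0 || m < k then none
  else
    let q : List Int := [-1] ++ pinks ++ [n]
    -- all indices i, i+k+1 are in range for q; the pyGetD default is never used
    let cands : List Int := (PySem.List.pyRange 0 (m - k + 1)).map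
      (fun i => PySem.List.pyGetD q (i + k + 1) 0 - PySem.List.pyGetD q i 0 - 1)
    match PySem.List.max? cands (fun y => y) with
    | some best => if 0 < best then some best else none
    | none => none

-- ===== PRECONDITION & SPEC =====
def Spec_longestBlues (tiles : List String) (k : Int) (out : Option Int) : Prop := out = longestBlues_alt tiles k
instance (tiles : List String) (k : Int) (out : Option Int) : Decidable (Spec_longestBlues tiles k out) := by unfold Spec_longestBlues; infer_instance

-- ===== CLAIM (what is proved, stated in full; the proofs are below) =====
def Claim_equal_longestBlues : Prop := ∀ (tiles : List String) (k : Int), Dom_longestBlues tiles k → Spec_longestBlues tiles k (longestBlues tiles k)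

-- ===== LEMMAS AND PROOFS =====

-- proof-side helpers: the window test, A's descending-width search, pink positions,
-- prefix pink counts, and the sentinel list q as a function
def pvCntEq (tiles : List String) (k : Int) (d w : Nat) : Bool :=
  ((PySem.List.count ((tiles.drop d).take w) "pink" : Int) == k)

def pvCond (tiles : List String) (k : Int) (w : Nat) : Bool :=
  (List.range (tiles.length - w + 1)).any (fun d => pvCntEq tiles k d w)

def pvFindW (tiles : List String) (k : Int) : Nat → Option Int
  | 0 => none
  | (w+1) => if pvCond tiles k (w+1) then some ((w + 1 : Nat) : Int) else pvFindW tiles k w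

def pvP (tiles : List String) : List Nat :=
  (List.range tiles.length).filter (fun i => tiles.getD i "" == "pink")

def pvC (tiles : List String) (t : Nat) : Nat := List.count "pink" (tiles.take t)

def pvQ (tiles : List String) (j : Nat) : Int :=
  (([-1] ++ (pvP tiles).map (fun (p : Nat) => (p : Int)) ++ [(tiles.length : Int)]).getD j 0)

theorem pvAny_iff (tiles : List String) (k : Int) (w : Nat) (hw : w ≤ tiles.length) :
    pvCond tiles k w = true ↔ ∃ d, d + w ≤ tiles.length ∧ pvCntEq tiles k d w = true := by
  unfold pvCond
  simp only [List.any_eq_true, List.mem_range]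
  constructor
  · rintro ⟨d, hd, hc⟩; exact ⟨d, by omega, hc⟩
  · rintro ⟨d, hd, hc⟩; exact ⟨d, by omega, hc⟩

theorem pvLoopA_eq (tiles : List String) (k : Int) :
    ∀ (fuel w i : Nat), w * (tiles.length + 1) + (tiles.length - i) ≤ fuel → 1 ≤ w → i + w ≤ tiles.length →
      ((∃ d, i ≤ d ∧ d + w ≤ tiles.length ∧ pvCntEq tiles k d w = true) →
        pvLoopA tiles k fuel i (i + w) w = some ((w : Nat) : Int)) ∧
      ((¬ ∃ d, i ≤ d ∧ d + w ≤ tiles.length ∧ pvCntEq tiles k d w = true) →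
        pvLoopA tiles k fuel i (i + w) w = pvFindW tiles k (w - 1)) := by
  intro fuel
  induction fuel with
  | zero =>
    intro w i hmu hw hiw
    have : 1 * (tiles.length + 1) ≤ w * (tiles.length + 1) := Nat.mul_le_mul_right _ hw
    omega
  | succ mu ih =>
    intro w i hmu hw hiw
    have hne : i ≠ i + w := by omega
    have hcast : ((i + w : Nat) : Int) = (i : Int) + (w : Nat) := by push_cast; ring
    have hunf : pvLoopA tiles k (mu + 1) i (i + w) w =
        (if pvCntEq tiles k i w then some (((i + w : Nat) : Int) - (i : Int))
         else if tiles.length < i + w + 1 then pvLoopA tiles k mu 0 (w - 1) (w - 1)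
         else pvLoopA tiles k mu (i + 1) (i + w + 1) w) := by
      rw [pvLoopA]
      rw [if_pos hne, hcast, PySem.List.slice_natCast_add]
      rfl
    by_cases hc : pvCntEq tiles k i w = true
    · rw [hunf, if_pos hc]
      constructor
      · intro _; congr 1; push_cast; ring
      · intro h; exact absurd ⟨i, le_refl i, hiw, hc⟩ h
    · rw [hunf, if_neg hc]
      by_cases hend : i + w = tiles.length
      · -- reset branch: i is the last start for this width
        rw [if_pos (by omega)]
        have hnoex : ¬ ∃ d, i ≤ d ∧ d + w ≤ tiles.length ∧ pvCntEq tiles k d w = true := by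
          rintro ⟨d, hd1, hd2, hd3⟩
          have : d = i := by omega
          exact hc (this ▸ hd3)
        refine ⟨fun h => absurd h hnoex, fun _ => ?_⟩
        match w, hw with
        | 1, _ =>
          cases mu <;> simp [pvLoopA, pvFindW]
        | (w' + 2), _ =>
          have hmu' : (w' + 1) * (tiles.length + 1) + (tiles.length - 0) ≤ mu := by
            have : (w' + 2) * (tiles.length + 1) = (w' + 1) * (tiles.length + 1) + (tiles.length + 1) := by ring
            omega
          have hw' : (0 : Nat) + (w' + 1) ≤ tiles.length := by omega
          obtain ⟨IH1, IH2⟩ := ih (w' + 1) 0 hmu' (by omega) hw'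
          have hto : pvLoopA tiles k mu 0 (w' + 2 - 1) (w' + 2 - 1) = pvLoopA tiles k mu 0 (0 + (w' + 1)) (w' + 1) := by
            norm_num
          show pvLoopA tiles k mu 0 (w' + 2 - 1) (w' + 2 - 1) = pvFindW tiles k (w' + 2 - 1)
          have hfw : pvFindW tiles k (w' + 2 - 1) =
              (if pvCond tiles k (w' + 1) then some ((w' + 1 : Nat) : Int) else pvFindW tiles k w') := by
            rfl
          rw [hto, hfw]
          by_cases hex : ∃ d, 0 ≤ d ∧ d + (w' + 1) ≤ tiles.length ∧ pvCntEq tiles k d (w' + 1) = true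
          · rw [IH1 hex]
            have : pvCond tiles k (w' + 1) = true := by
              rw [pvAny_iff tiles k (w' + 1) (by omega)]
              obtain ⟨d, _, hd2, hd3⟩ := hex
              exact ⟨d, hd2, hd3⟩
            rw [if_pos this]
          · rw [IH2 hex]
            have : ¬ pvCond tiles k (w' + 1) = true := by
              rw [pvAny_iff tiles k (w' + 1) (by omega)]
              rintro ⟨d, hd2, hd3⟩
              exact hex ⟨d, by omega, hd2, hd3⟩
            rw [if_neg this]
            norm_num
      · -- slide the window one step right
        rw [if_neg (by omega)]
        have hmu' : w * (tiles.length + 1) + (tiles.length - (i + 1)) ≤ mu := by omega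
        obtain ⟨IH1, IH2⟩ := ih w (i + 1) hmu' hw (by omega)
        have hsh : pvLoopA tiles k mu (i + 1) (i + w + 1) w = pvLoopA tiles k mu (i + 1) ((i + 1) + w) w := by
          congr 1
          omega
        rw [hsh]
        constructor
        · rintro ⟨d, hd1, hd2, hd3⟩
          have hd1' : i + 1 ≤ d := by
            rcases Nat.lt_or_ge i d with h | h
            · omega
            · have : d = i := by omega
              exact absurd (this ▸ hd3) hc
          exact IH1 ⟨d, hd1', hd2, hd3⟩
        · intro h
          exact IH2 (fun ⟨d, hd1, hd2, hd3⟩ => h ⟨d, by omega, hd2, hd3⟩)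

theorem pvA_eq_findW (tiles : List String) (k : Int) :
    longestBlues tiles k = pvFindW tiles k tiles.length := by
  have h0 : longestBlues tiles k =
      pvLoopA tiles k (tiles.length * (tiles.length + 1) + tiles.length) 0 tiles.length tiles.length := rfl
  rw [h0]
  rcases hn : tiles.length with _ | t
  · rfl
  · have hupto : pvLoopA tiles k ((t + 1) * (t + 1 + 1) + (t + 1)) 0 (t + 1) (t + 1) =
        pvLoopA tiles k ((t + 1) * (t + 1 + 1) + (t + 1)) 0 (0 + (t + 1)) (t + 1) := by
      norm_num
    obtain ⟨IH1, IH2⟩ := pvLoopA_eq tiles k ((t + 1) * (t + 1 + 1) + (t + 1)) (t + 1) 0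
      (by rw [hn]; omega) (by omega) (by rw [hn]; omega)
    have hfw : pvFindW tiles k (t + 1) =
        (if pvCond tiles k (t + 1) then some ((t + 1 : Nat) : Int) else pvFindW tiles k t) := rfl
    rw [hupto, hfw]
    by_cases hex : ∃ d, 0 ≤ d ∧ d + (t + 1) ≤ tiles.length ∧ pvCntEq tiles k d (t + 1) = true
    · rw [IH1 hex, if_pos ?_]
      rw [pvAny_iff tiles k (t + 1) (by omega)]
      obtain ⟨d, _, hd2, hd3⟩ := hex
      exact ⟨d, hd2, hd3⟩
    · rw [IH2 hex, if_neg ?_, Nat.add_sub_cancel]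
      rw [pvAny_iff tiles k (t + 1) (by omega)]
      rintro ⟨d, hd2, hd3⟩
      exact hex ⟨d, by omega, hd2, hd3⟩

-- ---- counting facts ----

theorem pv_countP_take (tiles : List String) (p : String → Bool) :
    ∀ (t : Nat), List.countP p (tiles.take t) =
      List.countP (fun i => decide (i < t) && p (tiles.getD i "")) (List.range tiles.length) := by
  induction tiles with
  | nil => intro t; simp
  | cons x xs ihx =>
    intro t
    cases t with
    | zero => simp
    | succ s =>
      rw [List.take_succ_cons, List.countP_cons, ihx s]
      rw [List.length_cons, List.range_succ_eq_map, List.countP_cons, List.countP_map]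
      have h1 : List.countP ((fun i => decide (i < s + 1) && p ((x :: xs).getD i "")) ∘ Nat.succ)
          (List.range xs.length) =
          List.countP (fun i => decide (i < s) && p (xs.getD i "")) (List.range xs.length) := by
        apply List.countP_congr
        intro a _
        simp [Function.comp]
      rw [h1]
      simp

theorem pvC_eq_countP (tiles : List String) (t : Nat) :
    pvC tiles t = List.countP (fun q => decide (q < t)) (pvP tiles) := by
  unfold pvC pvP
  rw [List.count_eq_countP, pv_countP_take, List.countP_filter]

theorem pvC_mono (tiles : List String) {t t' : Nat} (h : t ≤ t') : pvC tiles t ≤ pvC tiles t' := by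
  unfold pvC
  have hsub : (tiles.take t).Sublist (tiles.take t') := by
    rw [show tiles.take t = (tiles.take t').take t by rw [List.take_take, Nat.min_eq_left h]]
    exact List.take_sublist _ _
  exact List.Sublist.count_le _ hsub

theorem pvC_le (tiles : List String) (t : Nat) : pvC tiles t ≤ (pvP tiles).length := by
  have h1 : pvC tiles t ≤ pvC tiles tiles.length := by
    unfold pvC
    rw [List.take_length]
    exact List.Sublist.count_le _ (List.take_sublist _ _)
  have h2 : pvC tiles tiles.length = (pvP tiles).length := by
    rw [pvC_eq_countP]
    rw [List.countP_eq_length.2]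
    intro a ha
    have : a < tiles.length := by
      unfold pvP at ha
      have := List.mem_range.1 (List.mem_of_mem_filter ha)
      exact this
    simpa using this
  omega

theorem pvC_len (tiles : List String) : pvC tiles tiles.length = (pvP tiles).length := by
  rw [pvC_eq_countP, List.countP_eq_length.2]
  intro a ha
  have : a < tiles.length := List.mem_range.1 (List.mem_of_mem_filter ha)
  simpa using this

theorem pvWindow (tiles : List String) (d w : Nat) :
    pvC tiles (d + w) = pvC tiles d + List.count "pink" ((tiles.drop d).take w) := by
  unfold pvC
  rw [List.take_add, List.count_append]

-- ---- sorted-position facts ----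

theorem pvP_pairwise (tiles : List String) : (pvP tiles).Pairwise (· < ·) :=
  List.Pairwise.filter _ List.pairwise_lt_range

theorem pvP_lt_len (tiles : List String) {p : Nat} (h : p ∈ pvP tiles) : p < tiles.length :=
  List.mem_range.1 (List.mem_of_mem_filter h)

theorem pv_countP_split (l : List Nat) (i : Nat) (p : Nat → Bool) :
    l.countP p = (l.take i).countP p + (l.drop i).countP p := by
  rw [← List.countP_append, List.take_append_drop]

theorem pv_sorted_countP_lt (l : List Nat) (hs : l.Pairwise (· < ·)) (i : Nat) (h : i < l.length) :
    l.countP (fun x => decide (x < l[i])) = i := by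
  rw [pv_countP_split l i]
  have h1 : (l.take i).countP (fun x => decide (x < l[i])) = i := by
    rw [List.countP_eq_length.2, List.length_take]
    · omega
    · intro a ha
      obtain ⟨j, hj, rfl⟩ := List.mem_take_iff_getElem.1 ha
      have : l[j] < l[i] := (List.pairwise_iff_getElem.1 hs) j i (by omega) h (by omega)
      simpa using this
  have h2 : (l.drop i).countP (fun x => decide (x < l[i])) = 0 := by
    rw [List.countP_eq_zero]
    intro a ha
    obtain ⟨j, hj, rfl⟩ := List.mem_drop_iff_getElem.1 ha
    rcases Nat.eq_zero_or_pos j with hj0 | hj0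
    · subst hj0; simp
    · have : l[i] < l[i + j] := (List.pairwise_iff_getElem.1 hs) i (i + j) h (by omega) (by omega)
      simp only [decide_eq_true_eq]
      omega
  omega

theorem pv_sorted_countP_le (l : List Nat) (hs : l.Pairwise (· < ·)) (i : Nat) (h : i < l.length) :
    l.countP (fun x => decide (x ≤ l[i])) = i + 1 := by
  rw [pv_countP_split l (i + 1)]
  have h1 : (l.take (i + 1)).countP (fun x => decide (x ≤ l[i])) = i + 1 := by
    rw [List.countP_eq_length.2, List.length_take]
    · omega
    · intro a ha
      obtain ⟨j, hj, rfl⟩ := List.mem_take_iff_getElem.1 ha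
      rcases Nat.lt_or_ge j i with hji | hji
      · have : l[j] < l[i] := (List.pairwise_iff_getElem.1 hs) j i (by omega) h hji
        simp only [decide_eq_true_eq]; omega
      · have : j = i := by omega
        subst this; simp
  have h2 : (l.drop (i + 1)).countP (fun x => decide (x ≤ l[i])) = 0 := by
    rw [List.countP_eq_zero]
    intro a ha
    obtain ⟨j, hj, rfl⟩ := List.mem_drop_iff_getElem.1 ha
    have : l[i] < l[i + 1 + j] := (List.pairwise_iff_getElem.1 hs) i (i + 1 + j) h (by omega) (by omega)
    simp only [decide_eq_true_eq]
    omega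
  omega

theorem pvC_P (tiles : List String) (i : Nat) (h : i < (pvP tiles).length) :
    pvC tiles ((pvP tiles)[i]) = i ∧ pvC tiles ((pvP tiles)[i] + 1) = i + 1 := by
  constructor
  · rw [pvC_eq_countP]
    exact pv_sorted_countP_lt _ (pvP_pairwise tiles) i h
  · rw [pvC_eq_countP]
    rw [List.countP_congr (q := fun x => decide (x ≤ (pvP tiles)[i]))]
    · exact pv_sorted_countP_le _ (pvP_pairwise tiles) i h
    · intro a _; simp only [decide_eq_true_eq]; omega

-- ---- sentinel list facts ----

theorem pvQ_zero (tiles : List String) : pvQ tiles 0 = -1 := rfl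

theorem pvQ_succ (tiles : List String) (j : Nat) (h : j < (pvP tiles).length) :
    pvQ tiles (j + 1) = ((pvP tiles)[j] : Int) := by
  unfold pvQ
  have hlen : j < ((pvP tiles).map (fun (p : Nat) => (p : Int))).length := by simpa using h
  rw [List.append_assoc, List.singleton_append, List.getD_eq_getElem?_getD, List.getElem?_cons_succ,
      List.getElem?_append_left hlen, List.getElem?_eq_getElem hlen, List.getElem_map]
  simp

theorem pvQ_last (tiles : List String) : pvQ tiles ((pvP tiles).length + 1) = (tiles.length : Int) := by
  unfold pvQ
  rw [List.append_assoc, List.singleton_append, List.getD_eq_getElem?_getD, List.getElem?_cons_succ,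
      List.getElem?_append_right (by simp)]
  simp

theorem pvQ_bounds (tiles : List String) (j : Nat) : -1 ≤ pvQ tiles j ∧ pvQ tiles j ≤ (tiles.length : Int) := by
  unfold pvQ
  rw [List.getD_eq_getElem?_getD]
  rcases h : (([-1] : List Int) ++ (pvP tiles).map (fun (p : Nat) => (p : Int)) ++ [(tiles.length : Int)])[j]? with _ | v
  · simp
  · simp only [Option.getD_some]
    have hv : v ∈ (([-1] : List Int) ++ (pvP tiles).map (fun (p : Nat) => (p : Int)) ++ [(tiles.length : Int)]) :=
      List.mem_of_getElem? h
    rw [List.mem_append, List.mem_append] at hv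
    rcases hv with (hv | hv) | hv
    · rw [List.mem_singleton] at hv
      subst hv; constructor <;> omega
    · obtain ⟨p, hp, rfl⟩ := List.mem_map.1 hv
      have hlt := pvP_lt_len tiles hp
      have h0 : (0 : Int) ≤ (p : Int) := Int.natCast_nonneg p
      have h1 : (p : Int) < (tiles.length : Int) := by exact_mod_cast hlt
      omega
    · rw [List.mem_singleton] at hv
      subst hv; constructor <;> omega

-- ---- endpoint evaluation of pvC at the sentinels ----

theorem pvE1 (tiles : List String) (i : Nat) (h : i ≤ (pvP tiles).length) :
    pvC tiles ((pvQ tiles i + 1).toNat) = i := by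
  cases i with
  | zero => rw [pvQ_zero]; simp [pvC]
  | succ j =>
    rw [pvQ_succ tiles j (by omega)]
    have h3 := (pvC_P tiles j (by omega)).2
    convert h3 using 2

theorem pvE2 (tiles : List String) (j : Nat) (h1 : 1 ≤ j) (h2 : j ≤ (pvP tiles).length + 1) :
    pvC tiles ((pvQ tiles j).toNat) = j - 1 := by
  match j, h1 with
  | (i + 1), _ =>
    rcases Nat.lt_or_ge i (pvP tiles).length with hi | hi
    · rw [pvQ_succ tiles i hi]
      have h3 := (pvC_P tiles i hi).1
      have h4 : pvC tiles ((((pvP tiles)[i] : Int)).toNat) = pvC tiles ((pvP tiles)[i]) := by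
        congr 1
      rw [h4, h3]
      omega
    · have : i = (pvP tiles).length := by omega
      subst this
      rw [pvQ_last]
      have h4 : pvC tiles (((tiles.length : Int)).toNat) = pvC tiles tiles.length := by
        congr 1
      rw [h4, pvC_len]
      omega

theorem pvU1 (tiles : List String) (d : Nat) : pvQ tiles (pvC tiles d) ≤ (d : Int) - 1 := by
  rcases hc : pvC tiles d with _ | j
  · rw [pvQ_zero]; omega
  · have hj : j < (pvP tiles).length := by
      have := pvC_le tiles d
      omega
    rw [pvQ_succ tiles j hj]
    have hlt : (pvP tiles)[j] < d := by
      by_contra hge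
      have : pvC tiles d ≤ pvC tiles ((pvP tiles)[j]) := pvC_mono tiles (by omega)
      rw [(pvC_P tiles j hj).1] at this
      omega
    have : ((pvP tiles)[j] : Int) < (d : Int) := by exact_mod_cast hlt
    omega

theorem pvU2 (tiles : List String) (d w : Nat) (h : d + w ≤ tiles.length) :
    ((d : Int) + (w : Int)) ≤ pvQ tiles (pvC tiles (d + w) + 1) := by
  rcases Nat.lt_or_ge (pvC tiles (d + w)) ((pvP tiles).length) with he | he
  · rw [pvQ_succ tiles _ he]
    have hge : d + w ≤ (pvP tiles)[pvC tiles (d + w)] := by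
      by_contra hlt
      have h1 : pvC tiles ((pvP tiles)[pvC tiles (d + w)] + 1) ≤ pvC tiles (d + w) :=
        pvC_mono tiles (by omega)
      rw [(pvC_P tiles _ he).2] at h1
      omega
    exact_mod_cast by omega
  · have : pvC tiles (d + w) = (pvP tiles).length := by
      have := pvC_le tiles (d + w)
      omega
    rw [this, pvQ_last]
    exact_mod_cast by omega

-- ---- the two key direction lemmas ----

theorem pvL1 (tiles : List String) (k : Int) (i : Nat)
    (hk0 : 0 ≤ k) (hkm : k.toNat ≤ (pvP tiles).length) (hi : i ≤ (pvP tiles).length - k.toNat)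
    (hg : 1 ≤ pvQ tiles (i + k.toNat + 1) - pvQ tiles i - 1) :
    ∃ d, d + (pvQ tiles (i + k.toNat + 1) - pvQ tiles i - 1).toNat ≤ tiles.length ∧
      pvCntEq tiles k d ((pvQ tiles (i + k.toNat + 1) - pvQ tiles i - 1).toNat) = true := by
  set a := pvQ tiles i with ha
  set b := pvQ tiles (i + k.toNat + 1) with hb
  obtain ⟨ha1, _⟩ := pvQ_bounds tiles i
  obtain ⟨_, hb2⟩ := pvQ_bounds tiles (i + k.toNat + 1)
  refine ⟨(a + 1).toNat, by omega, ?_⟩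
  have hdw : (a + 1).toNat + (b - a - 1).toNat = b.toNat := by omega
  have hcd : pvC tiles ((a + 1).toNat) = i := pvE1 tiles i (by omega)
  have hce : pvC tiles (b.toNat) = i + k.toNat := by
    have := pvE2 tiles (i + k.toNat + 1) (by omega) (by omega)
    simpa using this
  have hwin := pvWindow tiles ((a + 1).toNat) ((b - a - 1).toNat)
  rw [hdw, hce, hcd] at hwin
  unfold pvCntEq
  rw [PySem.List.count_eq]
  have hcnt : List.count "pink" ((tiles.drop ((a + 1).toNat)).take ((b - a - 1).toNat)) = k.toNat := by
    omega
  rw [hcnt]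
  simp only [beq_iff_eq]
  omega

theorem pvL2 (tiles : List String) (k : Int) (d w : Nat)
    (_hw : 1 ≤ w) (hd : d + w ≤ tiles.length) (hc : pvCntEq tiles k d w = true) :
    0 ≤ k ∧ k.toNat ≤ (pvP tiles).length ∧
      ∃ i, i ≤ (pvP tiles).length - k.toNat ∧
        (w : Int) ≤ pvQ tiles (i + k.toNat + 1) - pvQ tiles i - 1 := by
  unfold pvCntEq at hc
  rw [PySem.List.count_eq] at hc
  simp only [beq_iff_eq] at hc
  have hk0 : 0 ≤ k := by rw [← hc]; positivity
  have hkc : k.toNat = List.count "pink" ((tiles.drop d).take w) := by omega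
  have hwin := pvWindow tiles d w
  have hie : pvC tiles d + k.toNat = pvC tiles (d + w) := by omega
  have hle : pvC tiles (d + w) ≤ (pvP tiles).length := pvC_le tiles (d + w)
  refine ⟨hk0, by omega, pvC tiles d, by omega, ?_⟩
  have h1 := pvU1 tiles d
  have h2 := pvU2 tiles d w hd
  rw [← hie] at h2
  omega

-- ---- running pvFindW against a known best width ----

theorem pvFindW_eq_some (tiles : List String) (k : Int) (b : Nat) :
    ∀ (W : Nat), 1 ≤ b → b ≤ W → pvCond tiles k b = true →
      (∀ w, b < w → w ≤ W → pvCond tiles k w = false) →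
      pvFindW tiles k W = some ((b : Nat) : Int) := by
  intro W
  induction W with
  | zero => intro h1 h2 _ _; omega
  | succ V ihV =>
    intro h1 h2 h3 h4
    rcases Nat.lt_or_ge V b with hb | hb
    · have : b = V + 1 := by omega
      subst this
      simp only [pvFindW]
      rw [if_pos h3]
    · simp only [pvFindW]
      rw [if_neg ?_, ihV h1 hb h3 (fun w hw1 hw2 => h4 w hw1 (by omega))]
      rw [h4 (V + 1) (by omega) (le_refl _)]
      simp

theorem pvFindW_eq_none (tiles : List String) (k : Int) :
    ∀ (W : Nat), (∀ w, 1 ≤ w → w ≤ W → pvCond tiles k w = false) → pvFindW tiles k W = none := by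
  intro W
  induction W with
  | zero => intro _; rfl
  | succ V ihV =>
    intro h
    simp only [pvFindW]
    rw [h (V + 1) (by omega) (le_refl _)]
    simp only [Bool.false_eq_true, if_false]
    exact ihV (fun w hw1 hw2 => h w hw1 (by omega))

-- ---- the B side ----

theorem pvPinks_eq (tiles : List String) :
    ((PySem.List.enumerate tiles).filter (fun it => it.2 == "pink")).map (fun it => it.1) =
      (pvP tiles).map (fun (p : Nat) => (p : Int)) := by
  rw [PySem.List.enumerate_eq_map_pyRange tiles ""]
  rw [show PySem.List.len tiles = ((tiles.length : Nat) : Int) by simp]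
  rw [PySem.List.pyRange_zero_nat, List.map_map, List.filter_map, List.map_map]
  unfold pvP
  have hf : ((fun (it : Int × String) => it.1) ∘ ((fun (j : Int) => (j, PySem.List.pyGetD tiles j "")) ∘ (fun (k : Nat) => (k : Int)))) =
      fun (k : Nat) => (k : Int) := rfl
  rw [hf]
  congr 1
  apply List.filter_congr
  intro a _
  simp [Function.comp]

theorem pvCands_eq (tiles : List String) (k : Int) (hk0 : 0 ≤ k) (hkm : k ≤ ((pvP tiles).length : Int)) :
    (PySem.List.pyRange 0 (((pvP tiles).length : Int) - k + 1)).map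
      (fun i => PySem.List.pyGetD ([-1] ++ (pvP tiles).map (fun (p : Nat) => (p : Int)) ++ [(tiles.length : Int)]) (i + k + 1) 0 -
                PySem.List.pyGetD ([-1] ++ (pvP tiles).map (fun (p : Nat) => (p : Int)) ++ [(tiles.length : Int)]) i 0 - 1) =
    (List.range ((pvP tiles).length - k.toNat + 1)).map
      (fun i => pvQ tiles (i + k.toNat + 1) - pvQ tiles i - 1) := by
  have h1 : ((pvP tiles).length : Int) - k + 1 = (((pvP tiles).length - k.toNat + 1 : Nat) : Int) := by
    omega
  rw [h1, PySem.List.pyRange_zero_nat, List.map_map]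
  apply List.map_congr_left
  intro i _
  simp only [Function.comp_apply]
  have h2 : ((i : Nat) : Int) + k + 1 = ((i + k.toNat + 1 : Nat) : Int) := by omega
  rw [h2, PySem.List.pyGetD_natCast, PySem.List.pyGetD_natCast]
  unfold pvQ
  rfl

theorem pvMain (tiles : List String) (k : Int) : longestBlues tiles k = longestBlues_alt tiles k := by
  rw [pvA_eq_findW]
  by_cases hneg : k < 0 ∨ ((pvP tiles).length : Int) < k
  · -- k is no possible pink count: both sides are none
    have halt : longestBlues_alt tiles k = none := by
      unfold longestBlues_alt
      simp only [pvPinks_eq, List.length_map]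
      have hc : (decide (k < 0) || decide (((pvP tiles).length : Int) < k)) = true := by
        rcases hneg with h | h <;> simp [h]
      rw [hc]
      simp
    rw [halt]
    apply pvFindW_eq_none
    intro w hw1 hw2
    by_contra hct
    obtain ⟨d, hd1, hd2⟩ := (pvAny_iff tiles k w hw2).1 (by simpa using hct)
    obtain ⟨hk0, hkm, -⟩ := pvL2 tiles k d w hw1 hd1 hd2
    omega
  · rw [not_or, not_lt, not_lt] at hneg
    obtain ⟨hk0, hkm⟩ := hneg
    set m0 := (pvP tiles).length with hm0
    set g : Nat → Int := fun i => pvQ tiles (i + k.toNat + 1) - pvQ tiles i - 1 with hg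
    have hkm' : k.toNat ≤ m0 := by omega
    have halt : longestBlues_alt tiles k =
        (match PySem.List.max? ((List.range (m0 - k.toNat + 1)).map g) (fun y => y) with
          | some best => if 0 < best then some best else none
          | none => none) := by
      unfold longestBlues_alt
      simp only [pvPinks_eq, List.length_map]
      have hc : (decide (k < 0) || decide ((m0 : Int) < k)) = false := by
        simp only [Bool.or_eq_false_iff, decide_eq_false_iff_not, not_lt]
        exact ⟨hk0, hkm⟩
      rw [hc]
      simp only [Bool.false_eq_true, if_false]
      rw [pvCands_eq tiles k hk0 hkm]
    rw [halt]
    set cands := (List.range (m0 - k.toNat + 1)).map g with hcands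
    have hne : cands ≠ [] := by
      simp [hcands, List.range_succ]
    rcases hmax : PySem.List.max? cands (fun y => y) with _ | best
    · exact absurd ((PySem.List.max?_eq_none_iff _ _).1 hmax) hne
    · change pvFindW tiles k tiles.length = if 0 < best then some best else none
      have hmem := PySem.List.max?_mem hmax
      obtain ⟨i0, hi0m, hbest⟩ := List.mem_map.1 hmem
      have hi0 : i0 ≤ m0 - k.toNat := by
        have := List.mem_range.1 hi0m
        omega
      have hmaxall : ∀ i, i ≤ m0 - k.toNat → g i ≤ best := by
        intro i hi
        exact PySem.List.max?_isMax hmax (g i) (List.mem_map.2 ⟨i, List.mem_range.2 (by omega), rfl⟩)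
      by_cases hpos : 0 < best
      · rw [if_pos hpos]
        have hg1 : 1 ≤ g i0 := by omega
        have hgn : g i0 ≤ (tiles.length : Int) := by
          obtain ⟨hq1, _⟩ := pvQ_bounds tiles i0
          obtain ⟨_, hq2⟩ := pvQ_bounds tiles (i0 + k.toNat + 1)
          simp only [hg]
          omega
        have hbn : best.toNat ≤ tiles.length := by omega
        obtain ⟨d, hdle, hdc⟩ := pvL1 tiles k i0 hk0 hkm' hi0 hg1
        have hcondb : pvCond tiles k best.toNat = true := by
          rw [pvAny_iff tiles k best.toNat hbn]
          refine ⟨d, ?_, ?_⟩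
          · have : (g i0).toNat = best.toNat := by rw [hbest]
            rw [← this]
            exact hdle
          · have : (g i0).toNat = best.toNat := by rw [hbest]
            rw [← this]
            exact hdc
        have hmaxw : ∀ w, best.toNat < w → w ≤ tiles.length → pvCond tiles k w = false := by
          intro w hbw hwn
          by_contra hct
          obtain ⟨d', hd1, hd2⟩ := (pvAny_iff tiles k w hwn).1 (by simpa using hct)
          obtain ⟨-, -, i, hi, hgi⟩ := pvL2 tiles k d' w (by omega) hd1 hd2
          have h5 : pvQ tiles (i + k.toNat + 1) - pvQ tiles i - 1 ≤ best := hmaxall i hi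
          omega
        rw [pvFindW_eq_some tiles k best.toNat tiles.length (by omega) hbn hcondb hmaxw]
        congr 1
        omega
      · rw [if_neg hpos]
        apply pvFindW_eq_none
        intro w hw1 hw2
        by_contra hct
        obtain ⟨d, hd1, hd2⟩ := (pvAny_iff tiles k w hw2).1 (by simpa using hct)
        obtain ⟨-, -, i, hi, hgi⟩ := pvL2 tiles k d w hw1 hd1 hd2
        have h5 : pvQ tiles (i + k.toNat + 1) - pvQ tiles i - 1 ≤ best := hmaxall i hi
        omega

-- ===== VERDICT (by name: the statement is the Claim_ definition above) =====
theorem longestBlues_spec : Claim_equal_longestBlues := by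
  intro tiles k _
  unfold Spec_longestBlues
  exact pvMain tiles k
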